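-- pv_equiv track=rewrite | github.com/Donskoy-Mikhail/Yandex-algorithms | sprints/sprint_8/G.py | search
-- ===== SOURCE A (Python) =====
-- def search(n, x, m, a):
--     a_diff = []
--
--     for n in range(len(a) - 1):
--         a_diff.append(a[n + 1] - a[n])
--
--     res = []
--
--     for n in range(len(x) - len(a) + 1):
--         match = True
--         for offset in range(len(a) - 1):
--             if x[n + offset + 1] - x[n + offset] != a_diff[offset]:
--                 match = False
--                 break
--
--         if match:
--             res.append(n)
--     return ' '.join(map(str, map(lambda e: e + 1, res)))
-- ===== SOURCE B (Python) =====
-- def search(n, x, m, a):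
--     dx = [x[i + 1] - x[i] for i in range(len(x) - 1)]
--     da = [a[i + 1] - a[i] for i in range(len(a) - 1)]
--     cand = list(range(len(x) - len(a) + 1))
--     for j in range(len(da)):
--         cand = [p for p in cand if dx[p + j] == da[j]]
--     return ' '.join(str(p + 1) for p in cand)
-- ===== Notes on version B (the rewrite author's own statement) =====
-- stated objective: alternative
-- what changed: A scans pattern offsets position-by-position with an inner break loop recomputing x's differences; B precomputes both difference arrays once and transposes the loops, filtering a shrinking candidate-position list per pattern offset.
import Mathlib
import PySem

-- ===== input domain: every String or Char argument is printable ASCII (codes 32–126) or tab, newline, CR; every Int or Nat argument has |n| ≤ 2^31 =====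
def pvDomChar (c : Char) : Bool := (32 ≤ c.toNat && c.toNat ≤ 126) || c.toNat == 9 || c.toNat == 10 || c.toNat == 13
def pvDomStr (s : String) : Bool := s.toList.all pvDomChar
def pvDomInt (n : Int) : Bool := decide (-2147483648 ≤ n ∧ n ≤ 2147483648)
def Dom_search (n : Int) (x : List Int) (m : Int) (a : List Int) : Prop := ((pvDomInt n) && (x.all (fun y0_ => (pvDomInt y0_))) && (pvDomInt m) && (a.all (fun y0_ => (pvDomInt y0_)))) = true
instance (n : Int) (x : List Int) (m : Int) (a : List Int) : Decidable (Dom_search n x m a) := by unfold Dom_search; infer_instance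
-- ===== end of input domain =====

-- B transposes A's loops: it precomputes the difference arrays once and, for each pattern
-- offset, filters a shrinking list of candidate start positions (objective: alternative).

-- ===== PORT A =====
def search (n : Int) (x : List Int) (m : Int) (a : List Int) : String :=
  let a_diff := (PySem.List.pyRange 0 ((a.length : Int) - 1)).foldl
    (fun acc k => acc ++ [PySem.List.pyGetD a (k + 1) 0 - PySem.List.pyGetD a k 0]) []
  let res := (PySem.List.pyRange 0 ((x.length : Int) - (a.length : Int) + 1)).foldl
    (fun res k =>
      let mtch := (PySem.List.pyRange 0 ((a.length : Int) - 1)).foldl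
        (fun ok off =>
          if (PySem.List.pyGetD x (k + off + 1) 0 - PySem.List.pyGetD x (k + off) 0) !=
              PySem.List.pyGetD a_diff off 0 then false else ok) true
      if mtch then res ++ [k] else res) []
  PySem.Str.join " " ((res.map (fun e => e + 1)).map PySem.Int.toStr)

-- ===== PORT B =====
def search_alt (n : Int) (x : List Int) (m : Int) (a : List Int) : String :=
  let dx := (PySem.List.pyRange 0 ((x.length : Int) - 1)).map
    (fun i => PySem.List.pyGetD x (i + 1) 0 - PySem.List.pyGetD x i 0)
  let da := (PySem.List.pyRange 0 ((a.length : Int) - 1)).map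
    (fun i => PySem.List.pyGetD a (i + 1) 0 - PySem.List.pyGetD a i 0)
  let cand := (PySem.List.pyRange 0 ((da.length : Int))).foldl
    (fun cand j => cand.filter (fun p => PySem.List.pyGetD dx (p + j) 0 == PySem.List.pyGetD da j 0))
    (PySem.List.pyRange 0 ((x.length : Int) - (a.length : Int) + 1))
  PySem.Str.join " " (cand.map (fun p => PySem.Int.toStr (p + 1)))

-- ===== PRECONDITION & SPEC =====
def Spec_search (n : Int) (x : List Int) (m : Int) (a : List Int) (out : String) : Prop := out = search_alt n x m a
instance (n : Int) (x : List Int) (m : Int) (a : List Int) (out : String) : Decidable (Spec_search n x m a out) := by unfold Spec_search; infer_instance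

-- ===== CLAIM (what is proved, stated in full; the proofs are below) =====
def Claim_equal_search : Prop := ∀ (n : Int) (x : List Int) (m : Int) (a : List Int), Dom_search n x m a → Spec_search n x m a (search n x m a)

-- ===== LEMMAS AND PROOFS =====
theorem rangeLenSelf (t : Int) : PySem.List.pyRange 0 ((PySem.List.pyRange 0 t).length : Int) = PySem.List.pyRange 0 t := by
  rcases (by omega : t ≤ 0 ∨ 0 < t) with h | h
  · rw [PySem.List.pyRange_one_eq_nil h]; simp
  · obtain ⟨k, rfl⟩ : ∃ k : Nat, t = (k : Int) := ⟨t.toNat, by omega⟩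
    rw [PySem.List.pyRange_zero_natCast]; simp [PySem.List.pyRange_zero_natCast]

theorem foldl_filter_eq_filter_all {α β : Type} (l : List β) (g : β → α → Bool) (init : List α) :
    l.foldl (fun acc e => acc.filter (g e)) init = init.filter (fun p => l.all (fun e => g e p)) := by
  induction l generalizing init with
  | nil => simp
  | cons e t ih => simp [ih, List.filter_filter, List.all_cons, Bool.and_comm]


theorem search_eq_alt (n : Int) (x : List Int) (m : Int) (a : List Int) :
    search n x m a = search_alt n x m a := by
  simp only [search, search_alt]
  rw [PySem.List.foldl_append_singleton_eq_map, List.nil_append]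
  rw [List.length_map, rangeLenSelf, foldl_filter_eq_filter_all]
  rw [PySem.List.foldl_append_if_eq_filter
    (p := fun k => (PySem.List.pyRange 0 ((a.length : Int) - 1)).foldl
      (fun ok off =>
        if (PySem.List.pyGetD x (k + off + 1) 0 - PySem.List.pyGetD x (k + off) 0) !=
            PySem.List.pyGetD ((PySem.List.pyRange 0 ((a.length : Int) - 1)).map
              (fun i => PySem.List.pyGetD a (i + 1) 0 - PySem.List.pyGetD a i 0)) off 0 then false else ok) true)]
  rw [List.nil_append, List.map_map]
  have hpred : ∀ k ∈ PySem.List.pyRange 0 ((x.length : Int) - (a.length : Int) + 1),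
      ((PySem.List.pyRange 0 ((a.length : Int) - 1)).foldl
        (fun ok off =>
          if (PySem.List.pyGetD x (k + off + 1) 0 - PySem.List.pyGetD x (k + off) 0) !=
              PySem.List.pyGetD ((PySem.List.pyRange 0 ((a.length : Int) - 1)).map
                (fun i => PySem.List.pyGetD a (i + 1) 0 - PySem.List.pyGetD a i 0)) off 0 then false else ok) true)
      = ((PySem.List.pyRange 0 ((a.length : Int) - 1)).all (fun e =>
          PySem.List.pyGetD ((PySem.List.pyRange 0 ((x.length : Int) - 1)).map
            (fun i => PySem.List.pyGetD x (i + 1) 0 - PySem.List.pyGetD x i 0)) (k + e) 0 ==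
          PySem.List.pyGetD ((PySem.List.pyRange 0 ((a.length : Int) - 1)).map
            (fun i => PySem.List.pyGetD a (i + 1) 0 - PySem.List.pyGetD a i 0)) e 0)) := by
    intro k hk
    rw [PySem.List.mem_pyRange_one] at hk
    rw [PySem.List.foldl_if_false_eq
      (p := fun off => (PySem.List.pyGetD x (k + off + 1) 0 - PySem.List.pyGetD x (k + off) 0) !=
        PySem.List.pyGetD ((PySem.List.pyRange 0 ((a.length : Int) - 1)).map
          (fun i => PySem.List.pyGetD a (i + 1) 0 - PySem.List.pyGetD a i 0)) off 0)]
    rw [Bool.true_and, List.all_eq_not_any_not]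
    congr 1
    apply PySem.List.any_congr_mem
    intro off hoff
    rw [PySem.List.mem_pyRange_one] at hoff
    have hx : ((x.length : Int) - 1) = (((x.length - 1 : Nat) : Nat) : Int) := by omega
    have hk2 : (k + off) = (((k + off).toNat : Nat) : Int) := by omega
    rw [hx, hk2, PySem.List.pyGetD_map_pyRange _ _ _ _ (by omega)]
    simp [bne]
  rw [List.filter_congr hpred]
  simp [Function.comp_def]

-- ===== VERDICT (by name: the statement is the Claim_ definition above) =====
theorem search_spec : Claim_equal_search :=
  fun n x m a _ => search_eq_alt n x m a
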